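-- pv_equiv track=rewrite | github.com/ripclass/trdrhub.com | apps/api/app/services/validator.py | _infer_doc_from_field
-- ===== SOURCE A (Python) =====
-- from typing import Any, Dict, List, Optional, Set, Tuple
--
-- FIELD_PREFIX_TO_DOC = {
--     "lc.": "lc",
--     "letter_of_credit.": "lc",
--     "invoice.": "commercial_invoice",
--     "commercial_invoice.": "commercial_invoice",
--     "bill_of_lading.": "bill_of_lading",
--     "bl.": "bill_of_lading",
--     "packing_list.": "packing_list",
--     "certificate_of_origin.": "certificate_of_origin",
--     "coo.": "certificate_of_origin",
--     "insurance_certificate.": "insurance_certificate",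
--     "insurance.": "insurance_certificate",
--     "inspection_certificate.": "inspection_certificate",
-- }
--
-- def _infer_doc_from_field(field_path: Optional[str]) -> Optional[str]:
--     if not field_path:
--         return None
--     lowered = field_path.lower()
--     for prefix, doc in FIELD_PREFIX_TO_DOC.items():
--         if lowered.startswith(prefix):
--             return doc
--     return None
-- ===== SOURCE B (Python) =====
-- FIELD_PREFIX_TO_DOC = {
--     "lc.": "lc",
--     "letter_of_credit.": "lc",
--     "invoice.": "commercial_invoice",
--     "commercial_invoice.": "commercial_invoice",
--     "bill_of_lading.": "bill_of_lading",
--     "bl.": "bill_of_lading",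
--     "packing_list.": "packing_list",
--     "certificate_of_origin.": "certificate_of_origin",
--     "coo.": "certificate_of_origin",
--     "insurance_certificate.": "insurance_certificate",
--     "insurance.": "insurance_certificate",
--     "inspection_certificate.": "inspection_certificate",
-- }
--
-- def _infer_doc_from_field(field_path):
--     if not field_path:
--         return None
--     lowered = field_path.lower()
--     idx = lowered.find(".")
--     if idx == -1:
--         return None
--     return FIELD_PREFIX_TO_DOC.get(lowered[:idx + 1])
-- ===== Notes on version B (the rewrite author's own statement) =====
-- stated objective: simpler
-- what changed: B replaces A's linear startswith scan over all 12 prefixes by locating the first dot and doing one direct dict lookup on the first segment (valid because every table key is a single token ending in its only dot).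
import Mathlib
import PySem

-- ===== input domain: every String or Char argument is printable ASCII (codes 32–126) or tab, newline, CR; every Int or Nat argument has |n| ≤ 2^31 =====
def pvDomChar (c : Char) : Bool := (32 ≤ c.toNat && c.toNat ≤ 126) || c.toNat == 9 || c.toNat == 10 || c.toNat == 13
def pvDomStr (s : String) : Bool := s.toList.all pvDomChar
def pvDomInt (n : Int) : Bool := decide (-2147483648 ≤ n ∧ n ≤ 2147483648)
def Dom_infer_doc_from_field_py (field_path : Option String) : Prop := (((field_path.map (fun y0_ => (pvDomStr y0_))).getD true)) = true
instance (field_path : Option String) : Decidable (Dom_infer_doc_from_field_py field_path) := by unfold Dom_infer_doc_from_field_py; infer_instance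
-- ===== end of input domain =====

-- B replaces A's linear startswith scan over all 12 prefixes by locating the first '.'
-- and doing one direct dict lookup on the first segment (objective: simpler).

-- the module-level FIELD_PREFIX_TO_DOC table (shared constant of both Pythons)
def pvTable : List (String × String) :=
  [("lc.", "lc"),
   ("letter_of_credit.", "lc"),
   ("invoice.", "commercial_invoice"),
   ("commercial_invoice.", "commercial_invoice"),
   ("bill_of_lading.", "bill_of_lading"),
   ("bl.", "bill_of_lading"),
   ("packing_list.", "packing_list"),
   ("certificate_of_origin.", "certificate_of_origin"),
   ("coo.", "certificate_of_origin"),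
   ("insurance_certificate.", "insurance_certificate"),
   ("insurance.", "insurance_certificate"),
   ("inspection_certificate.", "inspection_certificate")]

-- ===== PORT A =====
-- A's for-loop over FIELD_PREFIX_TO_DOC.items() with early return
def pvScanA (lowered : String) : List (String × String) → Option String
  | [] => none
  | (prefix_, doc) :: rest =>
      if PySem.Str.startswith lowered prefix_ then some doc else pvScanA lowered rest

def infer_doc_from_field_py (field_path : Option String) : Option String :=
  match field_path with
  | none => none
  | some s =>
      if s = "" then none
      else pvScanA (PySem.Str.lower s) pvTable

-- ===== PORT B =====
def infer_doc_from_field_py_alt (field_path : Option String) : Option String :=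
  match field_path with
  | none => none
  | some s =>
      if s = "" then none
      else
        let lowered := PySem.Str.lower s
        let idx := PySem.Str.find lowered "."
        if idx = -1 then none
        else (PySem.Dict.ofList pvTable).get? (PySem.Str.slice lowered none (some (idx + 1)))

-- ===== PRECONDITION & SPEC =====
def Spec_infer_doc_from_field_py (field_path : Option String) (out : Option String) : Prop := out = infer_doc_from_field_py_alt field_path
instance (field_path : Option String) (out : Option String) : Decidable (Spec_infer_doc_from_field_py field_path out) := by unfold Spec_infer_doc_from_field_py; infer_instance

-- ===== CLAIM (what is proved, stated in full; the proofs are below) =====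
def Claim_equal_infer_doc_from_field_py : Prop := ∀ (field_path : Option String), Dom_infer_doc_from_field_py field_path → Spec_infer_doc_from_field_py field_path (infer_doc_from_field_py field_path)

-- ===== LEMMAS AND PROOFS =====

-- [c] is a prefix of xs iff xs starts with c
theorem pv_singleton_prefix {c : Char} {xs : List Char} : [c] <+: xs ↔ xs.head? = some c := by
  cases xs with
  | nil => simp
  | cons x t => simp [List.cons_prefix_cons, eq_comm]

-- when lowered has no '.', a startswith test against a prefix containing '.' is false
theorem pv_no_dot (lowered : String) (p : String) (hp : '.' ∈ p.toList)
    (h : PySem.Str.find lowered "." = -1) :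
    PySem.Str.startswith lowered p = false := by
  rw [Bool.eq_false_iff, PySem.Str.startswith_eq]
  intro hsw
  rw [PySem.Chars.startswith_iff] at hsw
  have hno : ¬ ['.'] <:+: lowered.toList := by
    apply (PySem.Chars.find_eq_neg_one_iff lowered.toList ['.']).mp
    rw [← h, PySem.Str.find_eq]; rfl
  have hin : ['.'] <:+: p.toList := by
    obtain ⟨u, v, huv⟩ := List.append_of_mem hp
    exact ⟨u, v, by rw [huv]; simp⟩
  exact hno (hin.trans hsw.isInfix)

-- A's scan over a table returns none when every startswith test fails
theorem pv_scan_none (lw : String) (tbl : List (String × String))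
    (h : ∀ pd ∈ tbl, PySem.Str.startswith lw pd.1 = false) :
    pvScanA lw tbl = none := by
  induction tbl with
  | nil => rfl
  | cons hd tl ih =>
    obtain ⟨p, d⟩ := hd
    rw [pvScanA, if_neg (by simp only [h (p, d) List.mem_cons_self, Bool.false_eq_true, not_false_eq_true])]
    exact ih (fun pd hpd => h pd (List.mem_cons_of_mem _ hpd))

-- when the first '.' of lowered sits at index j, matching a prefix whose only '.'
-- is its last character is the same as the (j+1)-char initial segment equalling it
theorem pv_key_iff (lowered : String) (p : String)
    (hp : p.toList = p.toList.dropLast ++ ['.']) (htok : '.' ∉ p.toList.dropLast) (j : Nat)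
    (hj : PySem.Str.find lowered "." = (j : Int)) :
    PySem.Str.startswith lowered p = true ↔ lowered.toList.take (j + 1) = p.toList := by
  set tok := p.toList.dropLast with htokdef
  set l := lowered.toList with hl
  have hfind : PySem.Chars.find l ['.'] = (j : Int) := by rw [← hj, PySem.Str.find_eq]; rfl
  have h0 : (0:Int) ≤ PySem.Chars.find l ['.'] := by rw [hfind]; exact_mod_cast Nat.zero_le j
  obtain ⟨hdot, hmin⟩ := PySem.Chars.find_spec h0
  rw [hfind] at hdot hmin
  simp only [Int.toNat_natCast] at hdot hmin
  rw [PySem.Str.startswith_eq, PySem.Chars.startswith_iff, hp, ← hl]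
  constructor
  · intro hpre
    obtain ⟨r, hr⟩ := hpre
    have hll : l = tok ++ '.' :: r := by rw [← hr]; simp
    have hjdot : l[j]? = some '.' := by
      rw [← List.head?_drop]; exact pv_singleton_prefix.mp hdot
    have hge : tok.length ≤ j := by
      by_contra hlt
      rw [Nat.not_le] at hlt
      rw [hll, List.getElem?_append_left hlt] at hjdot
      exact htok (List.mem_of_getElem? (by simpa using hjdot))
    have hle : j ≤ tok.length := by
      by_contra hgt
      rw [Nat.not_le] at hgt
      refine hmin tok.length hgt (pv_singleton_prefix.mpr ?_)
      rw [List.head?_drop, hll, List.getElem?_append_right le_rfl]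
      simp
    have hjl : j = tok.length := le_antisymm hle hge
    subst hjl
    rw [hll]
    rw [show tok.length + 1 = (tok ++ ['.']).length by simp]
    rw [show tok ++ '.' :: r = (tok ++ ['.']) ++ r by simp]
    exact List.take_left ..
  · intro htake
    rw [← htake]
    exact List.take_prefix _ _

-- A's scan equals a first-match dict lookup when each startswith test is
-- equivalent to the corresponding key test
theorem pv_scan_eq_lookup (lw key : String) (tbl : List (String × String))
    (h : ∀ pd ∈ tbl, (PySem.Str.startswith lw pd.1 = true ↔ (pd.1 == key) = true)) :
    pvScanA lw tbl = (PySem.Dict.mk tbl).get? key := by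
  induction tbl with
  | nil => rfl
  | cons hd tl ih =>
    obtain ⟨p, d⟩ := hd
    rw [PySem.Dict.get?_mk_cons, pvScanA]
    by_cases hc : PySem.Str.startswith lw p = true
    · rw [if_pos hc, if_pos ((h (p, d) List.mem_cons_self).mp hc)]
    · rw [if_neg (by simpa using hc),
        if_neg (fun hb => hc ((h (p, d) List.mem_cons_self).mpr hb))]
      exact ih (fun pd hpd => h pd (List.mem_cons_of_mem _ hpd))

-- ===== VERDICT (by name: the statement is the Claim_ definition above) =====
theorem infer_doc_from_field_py_spec : Claim_equal_infer_doc_from_field_py := by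
  intro field_path _
  unfold Spec_infer_doc_from_field_py infer_doc_from_field_py infer_doc_from_field_py_alt
  cases field_path with
  | none => rfl
  | some s =>
    by_cases hs : s = ""
    · simp [hs]
    · simp only [hs, if_false]
      set lowered := PySem.Str.lower s with hlow
      by_cases hidx : PySem.Str.find lowered "." = -1
      · -- no dot anywhere: A's scan fails on every entry, B returns none
        rw [if_pos hidx]
        refine pv_scan_none lowered pvTable ?_
        intro pd hpd
        simp only [pvTable, List.mem_cons, List.not_mem_nil, or_false] at hpd
        rcases hpd with rfl|rfl|rfl|rfl|rfl|rfl|rfl|rfl|rfl|rfl|rfl|rfl <;>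
          exact pv_no_dot lowered _ (by decide) hidx
      · -- a first dot at index j: each startswith test is the key comparison
        have hge : (0:Int) ≤ PySem.Str.find lowered "." := by
          have h1 := PySem.Chars.neg_one_le_find lowered.toList ['.']
          have heq : PySem.Str.find lowered "." = PySem.Chars.find lowered.toList ['.'] := by
            rw [PySem.Str.find_eq]; rfl
          rw [heq] at hidx ⊢; omega
        obtain ⟨j, hj⟩ := Int.eq_ofNat_of_zero_le hge
        have hkey : (PySem.Str.slice lowered none (some (PySem.Str.find lowered "." + 1))).toList
            = lowered.toList.take (j + 1) := by
          rw [PySem.Str.toList_slice, hj, PySem.Chars.slice_eq_listSlice]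
          rw [show ((j:Int) + 1) = ((j + 1 : Nat) : Int) by push_cast; ring]
          exact PySem.List.slice_to_natCast lowered.toList (j+1)
        have hB : ∀ p : String,
            ((p == PySem.Str.slice lowered none (some (PySem.Str.find lowered "." + 1))) = true
              ↔ lowered.toList.take (j+1) = p.toList) := by
          intro p
          rw [beq_iff_eq, ← String.toList_inj, hkey, eq_comm]
        have hofY : PySem.Dict.ofList pvTable = PySem.Dict.mk pvTable := by decide
        rw [if_neg hidx, hofY]
        refine pv_scan_eq_lookup lowered _ pvTable ?_
        intro pd hpd
        simp only [pvTable, List.mem_cons, List.not_mem_nil, or_false] at hpd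
        rcases hpd with rfl|rfl|rfl|rfl|rfl|rfl|rfl|rfl|rfl|rfl|rfl|rfl <;>
          exact (pv_key_iff lowered _ (by decide) (by decide) j hj).trans (hB _).symm
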